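-- pv_equiv track=rewrite | github.com/DT-UCPH/cuc | agent/scripts/extract_notarius_evidence.py | expand_slash_alternatives
-- ===== SOURCE A (Python) =====
-- from typing import Dict, List, Tuple
-- from itertools import product
--
-- def expand_slash_alternatives(token: str) -> List[str]:
--     """
--     Expand slash-alternative segments inside a hyphenated form/root.
--     Example:
--       m-ḥ-w/y -> [m-ḥ-w, m-ḥ-y]
--     """
--     token = token.strip()
--     if "/" not in token:
--         return [token]
--
--     # Operate only on hyphenated strings; otherwise keep token unchanged.
--     if "-" not in token:
--         return [token]
--
--     segments = token.split("-")
--     choices: List[List[str]] = []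
--     for seg in segments:
--         seg = seg.strip()
--         if not seg:
--             return [token]
--         if "/" in seg:
--             opts = [s.strip() for s in seg.split("/") if s.strip()]
--             if len(opts) < 2:
--                 return [token]
--             choices.append(opts)
--         else:
--             choices.append([seg])
--
--     expanded = ["-".join(parts) for parts in product(*choices)]
--     # Stable unique
--     return list(dict.fromkeys(expanded))
-- ===== SOURCE B (Python) =====
-- from typing import List
--
--
-- def expand_slash_alternatives(token: str) -> List[str]:
--     """
--     Expand slash-alternative segments inside a hyphenated form/root.
--     Example:
--       m-h-w/y -> [m-h-w, m-h-y]
--     """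
--     token = token.strip()
--     if "/" not in token or "-" not in token:
--         return [token]
--
--     # Staged parse: strip segments, derive each segment's option list, validate.
--     raw = [seg.strip() for seg in token.split("-")]
--     choices = [[p for p in (x.strip() for x in seg.split("/")) if p] for seg in raw]
--     if any(len(opts) != 1 if "/" not in seg else len(opts) < 2
--            for seg, opts in zip(raw, choices)):
--         return [token]
--
--     # Mixed-radix enumeration: combination i is decoded by index arithmetic
--     # (last segment = least significant digit), deduplicated on the fly.
--     total = 1
--     for opts in choices:
--         total *= len(opts)
--     out: List[str] = []
--     for i in range(total):
--         q, parts = i, []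
--         for opts in reversed(choices):
--             parts.append(opts[q % len(opts)])
--             q //= len(opts)
--         s = "-".join(reversed(parts))
--         if s not in out:
--             out.append(s)
--     return out
-- ===== Notes on version B (the rewrite author's own statement) =====
-- stated objective: alternative
-- what changed: Replaces itertools.product enumeration with mixed-radix index arithmetic (combination i is decoded by repeated divmod over segment option counts, last segment least significant) with deduplication done on the fly by membership in the output list, and replaces A's single validating loop by staged passes (strip all segments, build all option lists, then one validity check over the zipped lists).
import Mathlib
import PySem

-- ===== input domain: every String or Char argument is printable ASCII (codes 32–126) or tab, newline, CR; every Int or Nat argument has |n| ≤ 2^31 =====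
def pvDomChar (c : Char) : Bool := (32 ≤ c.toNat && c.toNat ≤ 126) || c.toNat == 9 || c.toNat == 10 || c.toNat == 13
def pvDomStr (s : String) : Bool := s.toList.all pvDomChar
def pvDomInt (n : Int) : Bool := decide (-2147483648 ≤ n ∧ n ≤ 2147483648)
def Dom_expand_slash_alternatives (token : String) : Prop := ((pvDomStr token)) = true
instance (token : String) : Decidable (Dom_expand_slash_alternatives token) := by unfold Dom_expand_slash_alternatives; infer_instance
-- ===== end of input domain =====

-- B replaces itertools.product with mixed-radix index arithmetic (each combination decoded
-- from its index by repeated divmod) plus on-the-fly dedup, and parses in staged passes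
-- (objective: alternative algorithm for the expansion step).

-- ===== PORT A =====

-- '[s.strip() for s in seg.split("/") if s.strip()]' (both Pythons contain this expression)
def pvOpts (s : String) : List String :=
  ((PySem.Chars.splitOn s.toList ['/']).map
    (fun cs => PySem.Str.strip (String.ofList cs))).filter (fun x => decide (x ≠ ""))

-- itertools.product(*choices), as a list of tuples (here: lists), first factor slowest
def pvProduct (cs : List (List String)) : List (List String) :=
  match cs with
  | [] => [[]]
  | c :: rest => c.flatMap (fun x => (pvProduct rest).map (fun t => x :: t))

-- A's `for seg in segments` loop building `choices`; `none` = the early `return [token]`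
def pvChoicesA (segs : List String) (acc : List (List String)) : Option (List (List String)) :=
  match segs with
  | [] => some acc
  | seg :: rest =>
    let s := PySem.Str.strip seg
    if s = "" then none
    else if PySem.Str.isIn "/" s then
      let opts := pvOpts s
      if opts.length < 2 then none else pvChoicesA rest (acc ++ [opts])
    else pvChoicesA rest (acc ++ [[s]])

def expand_slash_alternatives (token : String) : List String :=
  let t := PySem.Str.strip token
  if !(PySem.Str.isIn "/" t) then [t]
  else if !(PySem.Str.isIn "-" t) then [t]
  else
    let segments := (PySem.Chars.splitOn t.toList ['-']).map String.ofList
    match pvChoicesA segments [] with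
    | none => [t]
    | some choices =>
      let expanded := (pvProduct choices).map (fun parts => PySem.Str.join "-" parts)
      PySem.List.dedup expanded

-- ===== PORT B =====

-- B's per-segment validity test in the `any(...)` comprehension
def pvBad (sc : String × List String) : Bool :=
  if !(PySem.Str.isIn "/" sc.1) then decide (sc.2.length ≠ 1) else decide (sc.2.length < 2)

def expand_slash_alternatives_alt (token : String) : List String :=
  let t := PySem.Str.strip token
  if !(PySem.Str.isIn "/" t) || !(PySem.Str.isIn "-" t) then [t]
  else
    let raw := ((PySem.Chars.splitOn t.toList ['-']).map String.ofList).map PySem.Str.strip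
    let choices := raw.map pvOpts
    if (raw.zip choices).any pvBad then [t]
    else
      let total := choices.foldl (fun a opts => a * (opts.length : Int)) 1
      (PySem.List.pyRange 0 total 1).foldl (fun out i =>
        let parts := (choices.reverse.foldl
          (fun (st : List String × Int) opts =>
            (st.1 ++ [PySem.List.pyGetD opts (PySem.Int.mod st.2 (opts.length : Int)) ""],
             PySem.Int.floordiv st.2 (opts.length : Int)))
          (([] : List String), i)).1
        let s := PySem.Str.join "-" parts.reverse
        if s ∈ out then out else out ++ [s]) []

-- ===== PRECONDITION & SPEC =====
def Spec_expand_slash_alternatives (token : String) (out : List String) : Prop := out = expand_slash_alternatives_alt token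
instance (token : String) (out : List String) : Decidable (Spec_expand_slash_alternatives token out) := by unfold Spec_expand_slash_alternatives; infer_instance

-- ===== CLAIM (what is proved, stated in full; the proofs are below) =====
def Claim_equal_expand_slash_alternatives : Prop := ∀ (token : String), Dom_expand_slash_alternatives token → Spec_expand_slash_alternatives token (expand_slash_alternatives token)

-- ===== LEMMAS AND PROOFS =====

-- least-significant-first mixed-radix decode, the value B's inner fold accumulates
def pvDec (rcs : List (List String)) (q : Int) : List String :=
  match rcs with
  | [] => []
  | c :: r =>
    PySem.List.pyGetD c (PySem.Int.mod q (c.length : Int)) "" ::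
      pvDec r (PySem.Int.floordiv q (c.length : Int))

theorem pvDec_fold (rcs : List (List String)) (p : List String) (q : Int) :
    (rcs.foldl
      (fun (st : List String × Int) opts =>
        (st.1 ++ [PySem.List.pyGetD opts (PySem.Int.mod st.2 (opts.length : Int)) ""],
         PySem.Int.floordiv st.2 (opts.length : Int))) (p, q)).1
    = p ++ pvDec rcs q := by
  induction rcs generalizing p q with
  | nil => simp [pvDec]
  | cons c r ih => simp [pvDec, ih]

theorem pvProduct_snoc (cs : List (List String)) (c : List String) :
    pvProduct (cs ++ [c]) = (pvProduct cs).flatMap (fun t => c.map (fun o => t ++ [o])) := by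
  induction cs with
  | nil =>
    simp only [List.nil_append, pvProduct, List.flatMap_cons, List.flatMap_nil, List.append_nil]
    exact List.map_eq_flatMap.symm
  | cons d cs ih =>
    simp only [List.cons_append, pvProduct, ih, List.flatMap_assoc, List.flatMap_map,
      List.map_flatMap, List.map_map, Function.comp_def]

theorem range_mul (T m : Nat) :
    List.range (T * m) = (List.range T).flatMap (fun a => (List.range m).map (fun b => a * m + b)) := by
  induction T with
  | zero => simp
  | succ T ih =>
    rw [Nat.succ_mul, List.range_add, ih, List.range_succ, List.flatMap_append]
    simp [Nat.add_comm]

theorem getD_range_map (xs : List String) (d : String) :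
    (List.range xs.length).map (fun i => xs.getD i d) = xs := by
  apply List.ext_getElem
  · simp
  · intro i h1 h2
    simp [List.getD_eq_getElem?_getD, List.getElem?_eq_getElem h2]

theorem pvDec_eq_product (cs : List (List String)) :
    (List.range ((cs.map List.length).prod)).map (fun (k : Nat) => (pvDec cs.reverse (k : Int)).reverse)
      = pvProduct cs := by
  induction cs using List.reverseRecOn with
  | nil => simp [pvDec, pvProduct]
  | append_singleton cs c ih =>
    have hm : ((cs ++ [c]).map List.length).prod = (cs.map List.length).prod * c.length := by
      simp
    rw [hm, range_mul, List.map_flatMap, pvProduct_snoc, ← ih, List.flatMap_map]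
    apply List.flatMap_congr
    intro a ha
    rw [List.map_map]
    conv_rhs => rw [← getD_range_map c ""]
    rw [List.map_map]
    apply List.map_congr_left
    intro b hb
    have hbm : b < c.length := List.mem_range.mp hb
    have hm0 : 0 < c.length := by omega
    simp only [Function.comp_def, List.reverse_append, List.reverse_cons]
    show (pvDec (c :: cs.reverse) ((a * c.length + b : Nat) : Int)).reverse = _
    rw [pvDec, PySem.Int.mod_natCast, PySem.Int.floordiv_natCast]
    have e1 : (a * c.length + b) % c.length = b := by
      rw [Nat.add_comm, Nat.add_mul_mod_self_right, Nat.mod_eq_of_lt hbm]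
    have e2 : (a * c.length + b) / c.length = a := by
      rw [Nat.add_comm, Nat.add_mul_div_right _ _ hm0, Nat.div_eq_of_lt hbm]; omega
    rw [e1, e2, PySem.List.pyGetD_natCast, List.reverse_cons]

theorem total_cast (cs : List (List String)) (a : Int) :
    cs.foldl (fun a opts => a * (opts.length : Int)) a = a * ((cs.map List.length).prod : Int) := by
  induction cs generalizing a with
  | nil => simp
  | cons c r ih => simp [ih]; ring

theorem dedup_aux (xs : List String) (acc : List String) :
    xs.foldl (fun out s => if s ∈ out then out else out ++ [s]) acc
      = xs.foldl PySem.Set.add acc := by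
  induction xs generalizing acc with
  | nil => rfl
  | cons x xs ih =>
    by_cases h : x ∈ acc <;> simp [PySem.Set.add, h, ih]

theorem dedup_foldl (xs : List String) :
    xs.foldl (fun out s => if s ∈ out then out else out ++ [s]) [] = PySem.List.dedup xs := by
  rw [PySem.List.dedup_eq_ofList, PySem.Set.ofList_eq_foldl, dedup_aux]

theorem foldl_ins_map_eq_dedup (f : Nat → String) (l : List Nat) :
    l.foldl (fun out k => if f k ∈ out then out else out ++ [f k]) []
      = PySem.List.dedup (l.map f) := by
  rw [← dedup_foldl]
  simp only [List.foldl_map]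

theorem go_no_sep (fuel : Nat) (l cur : List Char) (acc : List (List Char))
    (h : ∀ c ∈ l, c ≠ '/') :
    PySem.Chars.splitOn.go ['/'] fuel l cur acc = ((cur.reverse ++ l) :: acc).reverse := by
  induction fuel generalizing l cur acc with
  | zero => simp [PySem.Chars.splitOn.go]
  | succ fuel ih =>
    cases l with
    | nil => simp [PySem.Chars.splitOn.go]
    | cons c rest =>
      have hc : c ≠ '/' := h c (by simp)
      have hpre : List.isPrefixOf ['/'] (c :: rest) = false := by
        simp only [List.isPrefixOf, Bool.and_eq_false_iff]
        left
        simpa using fun e => hc e.symm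
      rw [PySem.Chars.splitOn.go]
      simp only [hpre, Bool.false_eq_true, if_false]
      rw [ih rest (c :: cur) acc (fun x hx => h x (by simp [hx]))]
      simp

theorem splitOn_no_sep (l : List Char) (h : PySem.Chars.isIn ['/'] l = false) :
    PySem.Chars.splitOn l ['/'] = [l] := by
  have hmem : ∀ c ∈ l, c ≠ '/' := by
    intro c hcl hc
    subst hc
    rw [PySem.Chars.isIn_eq_false_iff] at h
    obtain ⟨u, v, rfl⟩ := List.append_of_mem hcl
    exact h ⟨u, v, by simp⟩
  rw [PySem.Chars.splitOn, go_no_sep _ _ _ _ hmem]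
  simp

theorem dropWhile_prefix (p : Char → Bool) (w v : List Char) (hpre : w <+: v)
    (hv : List.dropWhile p v = v) : List.dropWhile p w = w := by
  cases w with
  | nil => simp
  | cons a w' =>
    cases v with
    | nil => simp at hpre
    | cons b v' =>
      have hab : a = b := by
        obtain ⟨t, ht⟩ := hpre
        simpa using congrArg (fun l => l.head?) ht
      subst hab
      rw [List.dropWhile_cons] at hv ⊢
      split_ifs with hp
      · exfalso
        rw [if_pos hp] at hv
        have := congrArg List.length hv
        simp at this
        have := List.length_dropWhile_le p v'
        omega
      · rfl

theorem rstrip_prefix (l : List Char) : PySem.Chars.rstrip l <+: l := by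
  rw [PySem.Chars.rstrip]
  conv_rhs => rw [← List.reverse_reverse l]
  exact List.reverse_prefix.mpr (List.dropWhile_suffix _)

theorem rstrip_idem (l : List Char) :
    PySem.Chars.rstrip (PySem.Chars.rstrip l) = PySem.Chars.rstrip l := by
  simp [PySem.Chars.rstrip, List.dropWhile_idempotent]

theorem strip_idem_chars (l : List Char) :
    PySem.Chars.strip (PySem.Chars.strip l) = PySem.Chars.strip l := by
  rw [PySem.Chars.strip, PySem.Chars.strip]
  have h1 : PySem.Chars.lstrip (PySem.Chars.rstrip (PySem.Chars.lstrip l))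
      = PySem.Chars.rstrip (PySem.Chars.lstrip l) := by
    rw [PySem.Chars.lstrip]
    exact dropWhile_prefix _ _ _ (rstrip_prefix _)
      (by rw [PySem.Chars.lstrip]; exact List.dropWhile_idempotent _ _)
  rw [h1, rstrip_idem]

theorem strip_idem (s : String) :
    PySem.Str.strip (PySem.Str.strip s) = PySem.Str.strip s := by
  apply String.toList_inj.mp
  simp [strip_idem_chars]

theorem pvOpts_no_slash (s : String) (h0 : s ≠ "") (hid : PySem.Str.strip s = s)
    (hno : PySem.Str.isIn "/" s = false) : pvOpts s = [s] := by
  rw [pvOpts]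
  have hno' : PySem.Chars.isIn ['/'] s.toList = false := by simpa using hno
  rw [splitOn_no_sep _ hno']
  simp only [List.map_cons, List.map_nil, List.filter]
  have hmk : String.ofList s.toList = s := String.ofList_toList
  rw [hmk, hid]
  simp [h0]

-- A's validating loop = B's staged passes (strip all, map pvOpts, one zipped check)
set_option maxHeartbeats 1600000 in
theorem choicesA_eq_staged (segs : List String) (acc : List (List String)) :
    pvChoicesA segs acc =
      (if ((segs.map PySem.Str.strip).zip ((segs.map PySem.Str.strip).map pvOpts)).any pvBad
          then none
       else some (acc ++ (segs.map PySem.Str.strip).map pvOpts)) := by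
  induction segs generalizing acc with
  | nil => simp [pvChoicesA]
  | cons seg rest ih =>
    rw [pvChoicesA]
    simp only [List.map_cons, List.zip_cons_cons, List.any_cons]
    by_cases h0 : PySem.Str.strip seg = ""
    · rw [if_pos h0, h0]
      have hbad : pvBad ("", pvOpts "") = true := by decide
      simp [hbad]
    · rw [if_neg h0]
      by_cases h1 : PySem.Str.isIn "/" (PySem.Str.strip seg) = true
      · simp only [h1]
        by_cases h2 : (pvOpts (PySem.Str.strip seg)).length < 2
        · have hbad : pvBad (PySem.Str.strip seg, pvOpts (PySem.Str.strip seg)) = true := by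
            simp only [pvBad]
            rw [h1]
            simp [h2]
          simp [hbad, h2]
        · have hbad : pvBad (PySem.Str.strip seg, pvOpts (PySem.Str.strip seg)) = false := by
            simp only [pvBad]
            rw [h1]
            simp [h2]
          rw [if_neg h2, ih, hbad, Bool.false_or]
          simp [List.append_assoc]
      · have h1' := eq_false_of_ne_true h1
        simp only [h1', Bool.false_eq_true, if_false]
        have hopts : pvOpts (PySem.Str.strip seg) = [PySem.Str.strip seg] :=
          pvOpts_no_slash _ h0 (strip_idem seg) h1'
        have h1'' : PySem.Chars.isIn ['/'] (PySem.Chars.strip seg.toList) = false := by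
          simpa using h1'
        have hbad : pvBad (PySem.Str.strip seg, pvOpts (PySem.Str.strip seg)) = false := by
          simp [pvBad, h1'', hopts]
        rw [ih, hbad, Bool.false_or]
        simp [hopts, List.append_assoc]

-- ===== VERDICT (by name: the statement is the Claim_ definition above) =====
theorem expand_slash_alternatives_spec : Claim_equal_expand_slash_alternatives := by
  intro token _
  unfold Spec_expand_slash_alternatives expand_slash_alternatives expand_slash_alternatives_alt
  generalize PySem.Str.strip token = t
  by_cases h1 : PySem.Str.isIn "/" t = true
  · by_cases h2 : PySem.Str.isIn "-" t = true
    · simp only [h1, h2, Bool.not_true, Bool.or_self, Bool.false_eq_true, if_false]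
      rw [choicesA_eq_staged]
      generalize ((PySem.Chars.splitOn t.toList ['-']).map String.ofList).map PySem.Str.strip = raw
      by_cases hbad : (raw.zip (raw.map pvOpts)).any pvBad = true
      · simp only [if_pos hbad]
      · simp only [if_neg hbad, List.nil_append]
        generalize raw.map pvOpts = choices
        apply Eq.symm
        have hfun : (fun (out : List String) (i : Int) =>
              let parts := (choices.reverse.foldl
                (fun (st : List String × Int) opts =>
                  (st.1 ++ [PySem.List.pyGetD opts (PySem.Int.mod st.2 (opts.length : Int)) ""],
                   PySem.Int.floordiv st.2 (opts.length : Int)))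
                (([] : List String), i)).1
              let s := PySem.Str.join "-" parts.reverse
              if s ∈ out then out else out ++ [s])
            = fun out i => (fun out s => if s ∈ out then out else out ++ [s]) out
                (PySem.Str.join "-" ((pvDec choices.reverse i).reverse)) := by
          funext out i
          simp only [pvDec_fold, List.nil_append]
        rw [hfun, total_cast, one_mul, PySem.List.pyRange_zero_nat, List.foldl_map,
          foldl_ins_map_eq_dedup (fun (k : Nat) =>
            PySem.Str.join "-" ((pvDec choices.reverse (k : Int)).reverse))]
        have hmap : (List.range ((choices.map List.length).prod)).map
              (fun (k : Nat) => PySem.Str.join "-" ((pvDec choices.reverse (k : Int)).reverse))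
            = (pvProduct choices).map (fun parts => PySem.Str.join "-" parts) := by
          rw [← pvDec_eq_product choices, List.map_map]
          rfl
        rw [hmap]
    · have h1' : PySem.Chars.isIn ['/'] t.toList = true := by simpa using h1
      have h2' : PySem.Chars.isIn ['-'] t.toList = false := by
        simpa using eq_false_of_ne_true h2
      simp [h1', h2']
  · have h1' : PySem.Chars.isIn ['/'] t.toList = false := by
      simpa using eq_false_of_ne_true h1
    simp [h1']
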